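-- pv_equiv track=rewrite | github.com/biel2k20/C-diguin-em-Python | Python/unidade6/cxalta/cxalta.py | caixa_alta
-- ===== SOURCE A (Python) =====
-- def caixa_alta(frase):
-- 	s = ''
-- 	flag = True
-- 	if len(frase) > 1:
-- 		if ord(frase[0]) >= 97 and frase[1] != ' ':
-- 			s += chr(ord(frase[0]) - 32)
-- 		elif ord(frase[0]) >= 97 and frase[1] == ' ':
-- 			s += frase[0]
-- 		elif ord(frase[0]) < 97 and frase[1] == ' ':
-- 			s += chr(ord(frase[0]) + 32)
-- 		elif ord(frase[0]) < 97 and frase[1] != ' ':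
-- 			s += frase[0]
-- 		for i in range(1,len(frase)-1):
-- 			viz = frase[i + 1]
-- 			ant = frase[i - 1]
-- 			if ant != ' ' and viz != ' ':
-- 				s += frase[i]
-- 			elif viz != ' ' and ant == ' ':
-- 				if ord(frase[i]) < 97:
-- 					s += frase[i]
-- 				else:
-- 					t = ord(frase[i]) - 32
-- 					m = chr(t)
-- 					s += m
-- 			elif viz == ' ' and ant == ' ':
-- 				if ord(frase[i]) >= 97:
-- 					s += frase[i]
-- 				else:
-- 					f = ord(frase[i]) + 32
-- 					g = chr(f)
-- 					s += g
-- 			elif viz == ' ' and ant != ' ':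
-- 				s += frase[i]
-- 		for i in range(len(frase)- 1,-1 ,-1):
-- 			if ord(frase[i]) < 97 and frase[i - 1] == ' ':
-- 				s += chr(ord(frase[i]) + 32)
-- 			else:
-- 				s += frase[i]
-- 			break
-- 	else:
-- 		if ord(frase[0]) >= 97:
-- 			s += frase[0]
-- 		else:
-- 			s += chr(ord(frase[0]) + 32)
-- 	return s
-- ===== SOURCE B (Python) =====
-- def _conv(ant, c, viz):
--     if ant == ' ' and viz != ' ':
--         return c if ord(c) < 97 else chr(ord(c) - 32)
--     if ant == ' ' and viz == ' ':
--         return c if ord(c) >= 97 else chr(ord(c) + 32)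
--     return c
--
-- def caixa_alta(frase):
--     pad = ' ' + frase + ' '
--     return ''.join(_conv(a, c, v) for a, c, v in zip(pad, pad[1:], pad[2:]))
-- ===== Notes on version B (the rewrite author's own statement) =====
-- stated objective: simpler
-- what changed: Replaces A's four separate position cases (first-char if-chain, interior index loop, backwards break-loop for the last char, single-char branch) with one uniform pass over (prev, char, next) triples of the space-padded string.
-- crash fix: On the empty string A raises IndexError (it reads frase[0]); B returns ''. — e.g. on caixa_alta(""): A raises IndexError, B returns ""
import Mathlib
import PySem

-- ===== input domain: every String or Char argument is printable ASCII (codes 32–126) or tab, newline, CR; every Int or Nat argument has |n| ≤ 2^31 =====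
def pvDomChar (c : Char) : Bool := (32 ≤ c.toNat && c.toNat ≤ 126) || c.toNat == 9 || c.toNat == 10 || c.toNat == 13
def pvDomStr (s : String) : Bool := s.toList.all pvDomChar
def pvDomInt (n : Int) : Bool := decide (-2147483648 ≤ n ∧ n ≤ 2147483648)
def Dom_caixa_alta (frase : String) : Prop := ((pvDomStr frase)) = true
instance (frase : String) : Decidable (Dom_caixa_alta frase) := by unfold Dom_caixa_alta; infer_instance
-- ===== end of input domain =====

-- B changes: one uniform pass over (prev, char, next) triples of the space-padded string instead of
-- A's four separate position cases; objective: simpler. A raises IndexError on "", B returns "" (see Raises_).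

-- ===== PORT A =====
def caixa_alta (frase : String) : String :=
  let l := frase.toList
  if 1 < l.length then
    -- first character, using frase[1] as the neighbour
    let first : List Char :=
      if 97 ≤ (PySem.List.pyGetD l 0 ' ').toNat ∧ PySem.List.pyGetD l 1 ' ' ≠ ' ' then
        [Char.ofNat ((PySem.List.pyGetD l 0 ' ').toNat - 32)]
      else if 97 ≤ (PySem.List.pyGetD l 0 ' ').toNat ∧ PySem.List.pyGetD l 1 ' ' = ' ' then
        [PySem.List.pyGetD l 0 ' ']
      else if (PySem.List.pyGetD l 0 ' ').toNat < 97 ∧ PySem.List.pyGetD l 1 ' ' = ' ' then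
        [Char.ofNat ((PySem.List.pyGetD l 0 ' ').toNat + 32)]
      else if (PySem.List.pyGetD l 0 ' ').toNat < 97 ∧ PySem.List.pyGetD l 1 ' ' ≠ ' ' then
        [PySem.List.pyGetD l 0 ' ']
      else []
    -- for i in range(1, len(frase)-1)
    let mid : List Char :=
      (PySem.List.pyRange 1 ((l.length : Int) - 1) 1).foldl (fun s i =>
        s ++ (if PySem.List.pyGetD l (i - 1) ' ' ≠ ' ' ∧ PySem.List.pyGetD l (i + 1) ' ' ≠ ' ' then
                [PySem.List.pyGetD l i ' ']
              else if PySem.List.pyGetD l (i + 1) ' ' ≠ ' ' ∧ PySem.List.pyGetD l (i - 1) ' ' = ' ' then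
                (if (PySem.List.pyGetD l i ' ').toNat < 97 then [PySem.List.pyGetD l i ' ']
                 else [Char.ofNat ((PySem.List.pyGetD l i ' ').toNat - 32)])
              else if PySem.List.pyGetD l (i + 1) ' ' = ' ' ∧ PySem.List.pyGetD l (i - 1) ' ' = ' ' then
                (if 97 ≤ (PySem.List.pyGetD l i ' ').toNat then [PySem.List.pyGetD l i ' ']
                 else [Char.ofNat ((PySem.List.pyGetD l i ' ').toNat + 32)])
              else if PySem.List.pyGetD l (i + 1) ' ' = ' ' ∧ PySem.List.pyGetD l (i - 1) ' ' ≠ ' ' then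
                [PySem.List.pyGetD l i ' ']
              else [])) first
    -- for i in range(len(frase)-1, -1, -1): … break  — the body runs once, on the head of the range
    let s : List Char :=
      match PySem.List.pyRange ((l.length : Int) - 1) (-1) (-1) with
      | [] => mid
      | i :: _ =>
        mid ++ (if (PySem.List.pyGetD l i ' ').toNat < 97 ∧ PySem.List.pyGetD l (i - 1) ' ' = ' ' then
                  [Char.ofNat ((PySem.List.pyGetD l i ' ').toNat + 32)]
                else [PySem.List.pyGetD l i ' '])
    String.mk s
  else
    -- Python reads frase[0] here and raises IndexError on ""; that input is outside Pre_
    String.mk (if 97 ≤ (PySem.List.pyGetD l 0 ' ').toNat then [PySem.List.pyGetD l 0 ' ']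
               else [Char.ofNat ((PySem.List.pyGetD l 0 ' ').toNat + 32)])

-- ===== PORT B =====
-- the 4-branch neighbour rule, applied uniformly to every (prev, char, next) triple
def pvConv (ant c viz : Char) : Char :=
  if ant = ' ' ∧ viz ≠ ' ' then (if c.toNat < 97 then c else Char.ofNat (c.toNat - 32))
  else if ant = ' ' ∧ viz = ' ' then (if 97 ≤ c.toNat then c else Char.ofNat (c.toNat + 32))
  else c

def caixa_alta_alt (frase : String) : String :=
  let pad := ' ' :: frase.toList ++ [' ']
  String.mk (((pad.zip (pad.drop 1)).zip (pad.drop 2)).map (fun x => pvConv x.1.1 x.1.2 x.2))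

-- ===== PRECONDITION & SPEC =====
-- Pre_ excludes only the empty string, on which A raises IndexError (frase[0]).
def Pre_caixa_alta (frase : String) : Prop := frase ≠ ""
instance (frase : String) : Decidable (Pre_caixa_alta frase) := by unfold Pre_caixa_alta; infer_instance
def pvWitness_caixa_alta : String := "ola Mundo"

-- On the empty string A raises IndexError (it reads frase[0]); B returns ''.
def Raises_caixa_alta (frase : String) : Prop := frase = ""
instance (frase : String) : Decidable (Raises_caixa_alta frase) := by unfold Raises_caixa_alta; infer_instance
def pvRaiseWitness_caixa_alta : String := ""
def pvRaiseWitnessOut_caixa_alta : String := ""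

def Spec_caixa_alta (frase : String) (out : String) : Prop := out = caixa_alta_alt frase
instance (frase : String) (out : String) : Decidable (Spec_caixa_alta frase out) := by unfold Spec_caixa_alta; infer_instance

-- ===== CLAIM (what is proved, stated in full; the proofs are below) =====
def Claim_equal_caixa_alta : Prop := ∀ (frase : String), Dom_caixa_alta frase → Pre_caixa_alta frase → Spec_caixa_alta frase (caixa_alta frase)
def Claim_raises_caixa_alta : Prop := (∀ (frase : String), Dom_caixa_alta frase → Raises_caixa_alta frase → ¬ Pre_caixa_alta frase) ∧ (Dom_caixa_alta (pvRaiseWitness_caixa_alta) ∧ Raises_caixa_alta (pvRaiseWitness_caixa_alta) ∧ caixa_alta_alt (pvRaiseWitness_caixa_alta) = pvRaiseWitnessOut_caixa_alta)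

-- ===== LEMMAS AND PROOFS =====

-- proof-side recursive view of B's pass
def pvG : Char → List Char → List Char
  | _, [] => []
  | a, [c] => [pvConv a c ' ']
  | a, c :: d :: rest => pvConv a c d :: pvG c (d :: rest)

-- B's zip pass computes pvG
theorem alt_eq_pvG_aux (l : List Char) (a : Char) :
    (((a :: (l ++ [' '])).zip ((a :: (l ++ [' '])).drop 1)).zip ((a :: (l ++ [' '])).drop 2)).map
      (fun x => pvConv x.1.1 x.1.2 x.2) = pvG a l := by
  induction l generalizing a with
  | nil => rfl
  | cons c rest ih =>
    cases rest with
    | nil => rfl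
    | cons d t =>
      simpa [pvG, List.zip_cons_cons] using ih c

theorem alt_eq_pvG (frase : String) :
    caixa_alta_alt frase = String.mk (pvG ' ' frase.toList) := by
  simp only [caixa_alta_alt, List.cons_append]
  rw [alt_eq_pvG_aux]

-- index characterisation of pvG
theorem pvG_index (l : List Char) (a b : Char) :
    pvG a (b :: l) = (List.range (l.length + 1)).map
      (fun k => pvConv ((a :: b :: l).getD k ' ') ((b :: l).getD k ' ') (l.getD k ' ')) := by
  induction l generalizing a b with
  | nil => rfl
  | cons x xs ih =>
    rw [pvG]
    simp only [List.length_cons]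
    rw [List.range_succ_eq_map]
    simp only [List.map_cons, List.map_map]
    refine congrArg₂ _ rfl ?_
    rw [ih]
    rfl

-- A's interior branch is pvConv
theorem pv_mid_eq (a c v : Char) :
    (if a ≠ ' ' ∧ v ≠ ' ' then [c]
     else if v ≠ ' ' ∧ a = ' ' then (if c.toNat < 97 then [c] else [Char.ofNat (c.toNat - 32)])
     else if v = ' ' ∧ a = ' ' then (if 97 ≤ c.toNat then [c] else [Char.ofNat (c.toNat + 32)])
     else if v = ' ' ∧ a ≠ ' ' then [c]
     else []) = [pvConv a c v] := by
  unfold pvConv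
  by_cases ha : a = ' ' <;> by_cases hv : v = ' ' <;> simp [ha, hv] <;>
    (try (split_ifs <;> rfl))

-- A's first-character chain is pvConv with a space before
theorem pv_first_eq (c0 c1 : Char) :
    (if 97 ≤ c0.toNat ∧ c1 ≠ ' ' then [Char.ofNat (c0.toNat - 32)]
     else if 97 ≤ c0.toNat ∧ c1 = ' ' then [c0]
     else if c0.toNat < 97 ∧ c1 = ' ' then [Char.ofNat (c0.toNat + 32)]
     else if c0.toNat < 97 ∧ c1 ≠ ' ' then [c0]
     else []) = [pvConv ' ' c0 c1] := by
  unfold pvConv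
  by_cases h : 97 ≤ c0.toNat <;> by_cases hv : c1 = ' ' <;> simp [h, hv]
  all_goals split_ifs <;> first | rfl | (exfalso; omega)

-- A's last-character branch is pvConv with a space after
theorem pv_last_eq (a c : Char) :
    (if c.toNat < 97 ∧ a = ' ' then [Char.ofNat (c.toNat + 32)] else [c]) = [pvConv a c ' '] := by
  unfold pvConv
  by_cases ha : a = ' ' <;> by_cases h : c.toNat < 97 <;> simp [ha, h]

-- A's single-character branch is pvConv between two spaces
theorem pv_single_eq (c : Char) :
    (if 97 ≤ c.toNat then [c] else [Char.ofNat (c.toNat + 32)]) = [pvConv ' ' c ' '] := by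
  unfold pvConv
  by_cases h : 97 ≤ c.toNat <;> simp [h]

theorem pv_shift0 (l : List Char) (k : Nat) :
    PySem.List.pyGetD l (1 + (k : Int) - 1) ' ' = l.getD k ' ' := by
  rw [show (1 + (k : Int) - 1) = (k : Int) by omega, PySem.List.pyGetD_natCast]

theorem pv_shift1 (l : List Char) (k : Nat) :
    PySem.List.pyGetD l (1 + (k : Int)) ' ' = l.getD (k + 1) ' ' := by
  rw [show (1 + (k : Int)) = ((k + 1 : Nat) : Int) by push_cast; omega, PySem.List.pyGetD_natCast]

theorem pv_shift2 (l : List Char) (k : Nat) :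
    PySem.List.pyGetD l (1 + (k : Int) + 1) ' ' = l.getD (k + 2) ' ' := by
  rw [show (1 + (k : Int) + 1) = ((k + 2 : Nat) : Int) by push_cast; omega, PySem.List.pyGetD_natCast]

-- ===== VERDICT (by name: the statement is the Clai m_ definition above) =====
theorem caixa_alta_eq_pvG (frase : String) (hl : frase.toList ≠ []) :
    caixa_alta frase = String.mk (pvG ' ' frase.toList) := by
  simp only [caixa_alta]
  generalize frase.toList = l at hl ⊢
  cases l with
  | nil => exact absurd rfl hl
  | cons c0 t =>
    cases t with
    | nil =>
      rw [if_neg (by simp)]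
      simp only [PySem.List.pyGetD_zero_cons]
      rw [pv_single_eq]
      rfl
    | cons c1 rest =>
      rw [if_pos (by simp)]
      rw [PySem.List.pyRange_neg_one_cons (by simp)]
      simp only [pv_mid_eq, pv_first_eq, pv_last_eq]
      rw [PySem.List.foldl_append_singleton_eq_map]
      rw [PySem.List.pyRange_one]
      simp only [List.map_map]
      have hL : ((c0 :: c1 :: rest).length : Int) - 1 - 1 = ((rest.length : Nat) : Int) := by
        simp
      have hL2 : ((c0 :: c1 :: rest).length : Int) - 1 = ((rest.length + 1 : Nat) : Int) := by
        simp
      rw [hL, hL2, pvG_index]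
      simp only [List.length_cons]
      rw [List.range_succ, List.range_succ_eq_map]
      simp only [PySem.List.pyGetD_natCast, PySem.List.pyGetD_zero_cons, List.map_append,
        List.map_cons, List.map_map, List.map_nil, Int.toNat_natCast]
      simp
      refine congrArg String.mk ?_
      congr 1
      · simp [PySem.List.pyGetD, PySem.List.pyGet?, PySem.List.pyIdx?]
      congr 1
      apply List.map_congr_left
      intro k hk
      simp only [Function.comp_apply, pv_shift0, pv_shift1, pv_shift2]
      simp [List.getD_eq_getElem?_getD, List.getElem?_cons_succ, Nat.succ_eq_add_one]

theorem caixa_alta_spec : Claim_equal_caixa_alta := by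
  intro frase _ hpre
  unfold Spec_caixa_alta
  rw [alt_eq_pvG, caixa_alta_eq_pvG]
  simpa [String.toList_eq_nil_iff] using hpre

@[simp]
theorem caixa_alta_raises : Claim_raises_caixa_alta := by
  unfold Claim_raises_caixa_alta
  exact ⟨by intro f _ hr hp; exact hp hr, by decide⟩
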